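-- pv_equiv track=rewrite | github.com/N4raKuzz/Enhancing-Argument-Classification-Models-with-Rationale-Based-Learning | TransformerWithBertWeight/dataset.py | create_rationale_mask
-- ===== SOURCE A (Python) =====
-- def create_rationale_mask(rationales, texts):
--
--     mask = [1] * len(texts)
--
--     def matches_rationale(doc_index, rationale):
--         if doc_index + len(rationale) > len(texts):
--             return False
--         for i, token in enumerate(rationale):
--             if texts[doc_index + i] != token:
--                 return False
--         return True
--
--     # Iterate through each token in the document
--     for i in range(len(texts)):
--         for rationale in rationales:
--             if matches_rationale(i, rationale):
--                 for j in range(len(rationale)):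
--                     mask[i + j] = -1
--
--     return mask
-- ===== SOURCE B (Python) =====
-- def create_rationale_mask(rationales, texts):
--     n = len(texts)
--     # Inverted index: token -> list of positions where it occurs in texts.
--     pos = {}
--     for idx, tok in enumerate(texts):
--         pos.setdefault(tok, []).append(idx)
--     # Difference array over match intervals: candidate starts come from the index.
--     diff = [0] * (n + 1)
--     for r in rationales:
--         m = len(r)
--         if m == 0:
--             continue
--         for i in pos.get(r[0], []):
--             if i + m <= n and texts[i:i+m] == r:
--                 diff[i] += 1
--                 diff[i+m] -= 1
--     # Prefix-sum sweep: position k is covered iff the running count is positive.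
--     mask = []
--     cur = 0
--     for k in range(n):
--         cur += diff[k]
--         mask.append(-1 if cur > 0 else 1)
--     return mask
-- ===== Notes on version B (the rewrite author's own statement) =====
-- stated objective: faster
-- what changed: A tries every rationale at every document position with a triple nested scan mutating the mask in place; B builds an inverted index token->positions once so each rationale is only verified at the positions where its first token occurs, records each match as an interval in a difference array, and produces the mask by a single prefix-sum sweep.
import Mathlib
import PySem

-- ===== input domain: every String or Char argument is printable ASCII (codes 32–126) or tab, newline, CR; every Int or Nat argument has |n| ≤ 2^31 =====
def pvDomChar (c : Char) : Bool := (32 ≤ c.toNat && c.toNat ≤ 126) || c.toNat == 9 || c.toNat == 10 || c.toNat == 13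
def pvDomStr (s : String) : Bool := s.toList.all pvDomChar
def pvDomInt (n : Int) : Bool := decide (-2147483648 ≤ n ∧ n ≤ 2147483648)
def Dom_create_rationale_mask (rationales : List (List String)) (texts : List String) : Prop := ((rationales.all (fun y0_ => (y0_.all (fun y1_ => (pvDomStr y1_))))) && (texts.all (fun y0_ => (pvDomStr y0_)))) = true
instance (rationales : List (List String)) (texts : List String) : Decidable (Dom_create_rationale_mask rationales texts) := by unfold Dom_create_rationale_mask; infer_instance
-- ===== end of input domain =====

-- B replaces A's position-major triple nested scan (try every rationale at every position,
-- mutate the mask in place) by an inverted index token -> occurrence positions built once, so that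
-- each rationale is only tried at the positions where its first token actually occurs, records each
-- match as an interval in a difference array, and emits the mask by one prefix-sum sweep
-- (objective: faster — the index skips the start positions whose first token cannot match; a timing run measured B faster on the generated inputs).

-- ===== PORT A =====
-- inner 'for i, token in enumerate(rationale)' loop of matches_rationale; the index i+j is in
-- range whenever the guard of pvMatchesRationale has passed, so the default "" of getD is unused
def pvMatchLoopA (texts : List String) (i : Nat) : List String → Nat → Bool
  | [], _ => true
  | t :: rest, j => if texts.getD (i + j) "" ≠ t then false else pvMatchLoopA texts i rest (j + 1)

def pvMatchesRationale (texts : List String) (i : Nat) (r : List String) : Bool :=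
  if texts.length < i + r.length then false else pvMatchLoopA texts i r 0

-- 'for j in range(len(rationale)): mask[i + j] = -1'  (all indices are nonnegative and in range)
def pvSetRange (mask : List Int) (i m : Nat) : List Int :=
  (List.range m).foldl (fun mk j => mk.set (i + j) (-1)) mask

-- range(len(texts)) runs over the nonnegative indices 0..n-1, ported as List.range
def create_rationale_mask (rationales : List (List String)) (texts : List String) : List Int :=
  (List.range texts.length).foldl
    (fun mask i => rationales.foldl
      (fun mask r => if pvMatchesRationale texts i r then pvSetRange mask i r.length else mask)
      mask)
    (List.replicate texts.length 1)

-- ===== PORT B =====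
-- 'pos.setdefault(tok, []).append(idx)' stores pos[tok] = pos.get(tok, []) + [idx] (same dict:
-- the key keeps its first-insertion position, which insert preserves)
def pvPosIndex (texts : List String) : PySem.Dict String (List Int) :=
  (PySem.List.enumerate texts 0).foldl
    (fun d p => d.insert p.2 (d.getD p.2 [] ++ [p.1]))
    PySem.Dict.empty

-- 'diff[i] += 1; diff[i+m] -= 1'; the index i comes from the position index so 0 ≤ i, and the
-- guard i + m ≤ n keeps both indices inside the n+1-long diff, so toNat and set are exact here
def pvApplyMatch (diff : List Int) (i : Int) (m : Nat) : List Int :=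
  let d1 := diff.set i.toNat (diff.getD i.toNat 0 + 1)
  d1.set (i.toNat + m) (d1.getD (i.toNat + m) 0 - 1)

-- the 'for r in rationales' loop filling the difference array ('m = len(r)' inlined;
-- r[0] is r.headD "", only read under the m ≠ 0 guard; pos.get(r[0], []) is Dict.getD)
def pvDiffArr (rationales : List (List String)) (texts : List String) : List Int :=
  rationales.foldl
    (fun diff r =>
      if r.length = 0 then diff
      else ((pvPosIndex texts).getD (r.headD "") []).foldl
        (fun diff i =>
          if i + (r.length : Int) ≤ (texts.length : Int) ∧
             PySem.List.slice texts (some i) (some (i + (r.length : Int))) = r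
          then pvApplyMatch diff i r.length else diff)
        diff)
    (List.replicate (texts.length + 1) 0)

-- final sweep 'cur += diff[k]; mask.append(-1 if cur > 0 else 1)' over range(n) (Nat indices)
def create_rationale_mask_alt (rationales : List (List String)) (texts : List String) : List Int :=
  let diff := pvDiffArr rationales texts
  ((List.range texts.length).foldl
    (fun (st : Int × List Int) k =>
      let cur := st.1 + diff.getD k 0
      (cur, st.2 ++ [if 0 < cur then (-1 : Int) else 1]))
    (0, [])).2

-- ===== PRECONDITION & SPEC =====
def Spec_create_rationale_mask (rationales : List (List String)) (texts : List String) (out : List Int) : Prop := out = create_rationale_mask_alt rationales texts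
instance (rationales : List (List String)) (texts : List String) (out : List Int) : Decidable (Spec_create_rationale_mask rationales texts out) := by unfold Spec_create_rationale_mask; infer_instance

-- ===== CLAIM (what is proved, stated in full; the proofs are below) =====
def Claim_equal_create_rationale_mask : Prop := ∀ (rationales : List (List String)) (texts : List String), Dom_create_rationale_mask rationales texts → Spec_create_rationale_mask rationales texts (create_rationale_mask rationales texts)

-- ===== LEMMAS AND PROOFS =====

-- the common characterisation: position k is masked iff some rationale matches at some i covering k
abbrev pvHitI (texts : List String) (rationales : List (List String)) (i k : Nat) : Prop :=
  ∃ r ∈ rationales, pvMatchesRationale texts i r = true ∧ i ≤ k ∧ k < i + r.length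

abbrev pvHit (texts : List String) (rationales : List (List String)) (k : Nat) : Prop :=
  ∃ i < texts.length, pvHitI texts rationales i k

-- ---- A side ----

lemma pvSetRange_length (mask : List Int) (i m : Nat) :
    (pvSetRange mask i m).length = mask.length := by
  unfold pvSetRange
  generalize List.range m = l
  induction l generalizing mask with
  | nil => rfl
  | cons j l ih => simp [List.foldl_cons, ih]

lemma pvSetRange_getElem? (mask : List Int) (i m k : Nat) (h : i + m ≤ mask.length) :
    (pvSetRange mask i m)[k]? = if i ≤ k ∧ k < i + m then some (-1) else mask[k]? := by
  induction m with
  | zero => simp [pvSetRange]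
  | succ m ih =>
    have hm : i + m ≤ mask.length := by omega
    have hstep : pvSetRange mask i (m + 1) = (pvSetRange mask i m).set (i + m) (-1) := by
      unfold pvSetRange; rw [List.range_succ, List.foldl_append]; rfl
    rw [hstep, List.getElem?_set, pvSetRange_length]
    by_cases hk : i + m = k
    · rw [if_pos hk, if_pos (by omega), if_pos (by omega)]
    · rw [if_neg hk, ih hm]
      by_cases h2 : i ≤ k ∧ k < i + m
      · rw [if_pos h2, if_pos ⟨h2.1, by omega⟩]
      · rw [if_neg h2, if_neg (by omega)]

lemma pvMatches_le (texts : List String) (i : Nat) (r : List String)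
    (h : pvMatchesRationale texts i r = true) : i + r.length ≤ texts.length := by
  unfold pvMatchesRationale at h
  by_cases hc : texts.length < i + r.length
  · rw [if_pos hc] at h; exact absurd h (by simp)
  · omega

lemma pvInnerA_length (texts : List String) (i : Nat) :
    ∀ (rs : List (List String)) (mask : List Int),
    (rs.foldl (fun mask r => if pvMatchesRationale texts i r then pvSetRange mask i r.length else mask) mask).length = mask.length := by
  intro rs
  induction rs with
  | nil => intro mask; rfl
  | cons r rs ih =>
    intro mask
    rw [List.foldl_cons, ih]
    split
    · exact pvSetRange_length mask i r.length
    · rfl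

lemma pvInnerA_getElem? (texts : List String) (i k : Nat) :
    ∀ (rs : List (List String)) (mask : List Int), mask.length = texts.length →
    (rs.foldl (fun mask r => if pvMatchesRationale texts i r then pvSetRange mask i r.length else mask) mask)[k]?
      = if pvHitI texts rs i k then some (-1) else mask[k]? := by
  intro rs
  induction rs with
  | nil => intro mask _; simp
  | cons r rs ih =>
    intro mask hlen
    rw [List.foldl_cons]
    by_cases hm : pvMatchesRationale texts i r = true
    · rw [if_pos hm, ih _ (by rw [pvSetRange_length]; exact hlen)]
      have hle : i + r.length ≤ mask.length := by
        rw [hlen]; exact pvMatches_le texts i r hm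
      rw [pvSetRange_getElem? mask i r.length k hle]
      by_cases h1 : pvHitI texts rs i k
      · rw [if_pos h1, if_pos (by obtain ⟨r', hr', hrest⟩ := h1; exact ⟨r', List.mem_cons_of_mem _ hr', hrest⟩)]
      · rw [if_neg h1]
        by_cases h2 : i ≤ k ∧ k < i + r.length
        · rw [if_pos h2, if_pos ⟨r, List.mem_cons_self, hm, h2.1, h2.2⟩]
        · rw [if_neg h2, if_neg (by
            rintro ⟨r', hr', hmr', hik, hkr'⟩
            rcases List.mem_cons.mp hr' with rfl | hmem
            · exact h2 ⟨hik, hkr'⟩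
            · exact h1 ⟨r', hmem, hmr', hik, hkr'⟩)]
    · rw [if_neg hm, ih _ hlen]
      by_cases h1 : pvHitI texts rs i k
      · rw [if_pos h1, if_pos (by obtain ⟨r', hr', hrest⟩ := h1; exact ⟨r', List.mem_cons_of_mem _ hr', hrest⟩)]
      · rw [if_neg h1, if_neg (by
          rintro ⟨r', hr', hmr', hik, hkr'⟩
          rcases List.mem_cons.mp hr' with rfl | hmem
          · exact hm hmr'
          · exact h1 ⟨r', hmem, hmr', hik, hkr'⟩)]

lemma pvOuterA_getElem? (texts : List String) (rs : List (List String)) (k : Nat) :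
    ∀ (is : List Nat) (mask : List Int), mask.length = texts.length →
    (is.foldl (fun mask i => rs.foldl (fun mask r => if pvMatchesRationale texts i r then pvSetRange mask i r.length else mask) mask) mask)[k]?
      = if ∃ i ∈ is, pvHitI texts rs i k then some (-1) else mask[k]? := by
  intro is
  induction is with
  | nil => intro mask _; simp
  | cons i is ih =>
    intro mask hlen
    rw [List.foldl_cons, ih _ (by rw [pvInnerA_length]; exact hlen)]
    rw [pvInnerA_getElem? texts i k rs mask hlen]
    by_cases h1 : ∃ i' ∈ is, pvHitI texts rs i' k
    · rw [if_pos h1, if_pos (by obtain ⟨i', hi', hh⟩ := h1; exact ⟨i', List.mem_cons_of_mem _ hi', hh⟩)]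
    · rw [if_neg h1]
      by_cases h2 : pvHitI texts rs i k
      · rw [if_pos h2, if_pos ⟨i, List.mem_cons_self, h2⟩]
      · rw [if_neg h2, if_neg (by
          rintro ⟨i', hi', hh⟩
          rcases List.mem_cons.mp hi' with rfl | hmem
          · exact h2 hh
          · exact h1 ⟨i', hmem, hh⟩)]

lemma pvHit_lt (texts : List String) (rs : List (List String)) (k : Nat)
    (h : pvHit texts rs k) : k < texts.length := by
  obtain ⟨i, _, r, _, hm, _, hk⟩ := h
  have := pvMatches_le texts i r hm
  omega

lemma pvA_getElem? (rationales : List (List String)) (texts : List String) (k : Nat) :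
    (create_rationale_mask rationales texts)[k]?
      = if k < texts.length then some (if pvHit texts rationales k then (-1 : Int) else 1) else none := by
  unfold create_rationale_mask
  rw [pvOuterA_getElem? texts rationales k (List.range texts.length) _ (by simp)]
  have hiff : (∃ i ∈ List.range texts.length, pvHitI texts rationales i k) ↔ pvHit texts rationales k := by
    constructor
    · rintro ⟨i, hi, hh⟩; exact ⟨i, List.mem_range.mp hi, hh⟩
    · rintro ⟨i, hi, hh⟩; exact ⟨i, List.mem_range.mpr hi, hh⟩
  by_cases hh : pvHit texts rationales k
  · rw [if_pos (hiff.mpr hh), if_pos (pvHit_lt texts rationales k hh), if_pos hh]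
  · rw [if_neg (fun h => hh (hiff.mp h)), List.getElem?_replicate]
    by_cases hk : k < texts.length
    · rw [if_pos hk, if_pos hk, if_neg hh]
    · rw [if_neg hk, if_neg hk]

-- ---- the match test of A equals the slice comparison of B ----

lemma pvMatchLoopA_iff (texts : List String) (i : Nat) :
    ∀ (r : List String) (j : Nat), i + j + r.length ≤ texts.length →
    (pvMatchLoopA texts i r j = true ↔ (texts.drop (i + j)).take r.length = r) := by
  intro r
  induction r with
  | nil => intro j _; simp [pvMatchLoopA]
  | cons t rest ih =>
    intro j h
    have hij : i + j < texts.length := by simp at h; omega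
    have hdrop : texts.drop (i + j) = texts[i + j] :: texts.drop (i + j + 1) :=
      List.drop_eq_getElem_cons hij
    have hget : texts.getD (i + j) "" = texts[i + j] := List.getD_eq_getElem texts "" hij
    unfold pvMatchLoopA
    rw [hdrop, List.length_cons, List.take_succ_cons, hget]
    by_cases ht : texts[i + j] = t
    · rw [if_neg (by simp [ht])]
      have hrest : i + (j + 1) + rest.length ≤ texts.length := by simp at h; omega
      rw [ih (j + 1) hrest, show i + (j + 1) = i + j + 1 from by omega]
      constructor
      · intro he; rw [he, ht]
      · intro he; exact (List.cons.injEq _ _ _ _ ▸ he).2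
    · rw [if_pos (by simp [ht])]
      simp [ht]

lemma pvMatches_iff (texts : List String) (i : Nat) (r : List String) :
    pvMatchesRationale texts i r = true ↔
      i + r.length ≤ texts.length ∧ (texts.drop i).take r.length = r := by
  unfold pvMatchesRationale
  by_cases hc : texts.length < i + r.length
  · rw [if_pos hc]
    simp only [Bool.false_eq_true, false_iff]
    rintro ⟨h1, _⟩; omega
  · rw [if_neg hc]
    have h := pvMatchLoopA_iff texts i r 0 (by omega)
    simp only [Nat.add_zero] at h
    rw [h]
    exact ⟨fun h2 => ⟨by omega, h2⟩, fun h2 => h2.2⟩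

-- ---- B side: the position index lists exactly the occurrences of a token ----

lemma pvPosIndex_foldl :
    ∀ (ps : List (Int × String)) (d : PySem.Dict String (List Int)) (t : String),
    ((ps.foldl (fun d p => d.insert p.2 (d.getD p.2 [] ++ [p.1])) d).getD t [])
      = d.getD t [] ++ (ps.filter (fun p => p.2 = t)).map (·.1) := by
  intro ps
  induction ps with
  | nil => intro d t; simp
  | cons p ps ih =>
    intro d t
    rw [List.foldl_cons, ih, PySem.Dict.getD_insert]
    by_cases h : p.2 = t
    · rw [if_pos (by simp [h]), List.filter_cons_of_pos (by simp [h]), List.map_cons]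
      subst h; simp
    · rw [if_neg (by simp [Ne.symm h]), List.filter_cons_of_neg (by simp [h])]

lemma pvPosIndex_mem (texts : List String) (t : String) (j : Int) :
    j ∈ (pvPosIndex texts).getD t [] ↔
      ∃ a : Nat, a < texts.length ∧ texts[a]? = some t ∧ j = (a : Int) := by
  unfold pvPosIndex
  rw [pvPosIndex_foldl]
  have hempty : (PySem.Dict.empty : PySem.Dict String (List Int)).getD t [] = [] := rfl
  rw [hempty, List.nil_append, List.mem_map]
  constructor
  · rintro ⟨p, hp, hj⟩
    rw [List.mem_filter] at hp
    obtain ⟨hp, ht⟩ := hp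
    obtain ⟨a, ha, rfl⟩ := (PySem.List.mem_enumerate_iff _ _ _).mp hp
    simp only [decide_eq_true_eq] at ht
    refine ⟨a, ha, ?_, by simpa using hj.symm⟩
    rw [List.getElem?_eq_getElem ha, ht]
  · rintro ⟨a, ha, hta, rfl⟩
    have hat : texts[a] = t := by
      rw [List.getElem?_eq_getElem ha] at hta
      exact Option.some.inj hta
    refine ⟨((0 : Int) + a, texts[a]), ?_, by simp⟩
    rw [List.mem_filter]
    exact ⟨(PySem.List.mem_enumerate_iff _ _ _).mpr ⟨a, ha, rfl⟩, by simp [hat]⟩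

-- ---- B side: prefix sums of the difference array count the covering matches ----

def pvPsum (diff : List Int) (k : Nat) : Int :=
  ∑ j ∈ Finset.range (k + 1), diff.getD j 0

lemma pvPsum_set (diff : List Int) (j : Nat) (v : Int) (hj : j < diff.length) (k : Nat) :
    pvPsum (diff.set j v) k = pvPsum diff k + (if j ≤ k then v - diff.getD j 0 else 0) := by
  unfold pvPsum
  have hpt : ∀ t, (diff.set j v).getD t 0 = diff.getD t 0 + (if t = j then v - diff.getD j 0 else 0) := by
    intro t
    rw [List.getD_eq_getElem?_getD, List.getD_eq_getElem?_getD, List.getElem?_set]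
    by_cases h : j = t
    · subst h
      rw [if_pos rfl, if_pos rfl, if_pos hj, List.getD_eq_getElem?_getD,
        List.getElem?_eq_getElem hj]
      simp
    · rw [if_neg h, if_neg (fun ht => h ht.symm), add_zero]
  simp only [hpt, Finset.sum_add_distrib]
  rw [Finset.sum_ite_eq' (Finset.range (k + 1)) j (fun _ => v - diff.getD j 0)]
  congr 1
  simp

lemma pvApplyMatch_length (diff : List Int) (i : Int) (m : Nat) :
    (pvApplyMatch diff i m).length = diff.length := by
  simp [pvApplyMatch]

lemma pvPsum_apply (diff : List Int) (i : Int) (m k n : Nat)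
    (_h0 : 0 ≤ i) (hm : i.toNat + m ≤ n) (hlen : diff.length = n + 1) :
    pvPsum (pvApplyMatch diff i m) k
      = pvPsum diff k + (if i.toNat ≤ k ∧ k < i.toNat + m then 1 else 0) := by
  unfold pvApplyMatch
  rw [pvPsum_set _ _ _ (by rw [List.length_set, hlen]; omega) k,
    pvPsum_set _ _ _ (by rw [hlen]; omega) k]
  have h1 : diff.getD i.toNat 0 + 1 - diff.getD i.toNat 0 = 1 := by ring
  have h2 : ∀ x : Int, x - 1 - x = -1 := by intro x; ring
  rw [h1, h2]
  split_ifs <;> omega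

-- the inner candidate loop: psum grows by the number of covering matches found
lemma pvPsum_inner (texts : List String) (r : List String) (k : Nat) :
    ∀ (l : List Int) (diff : List Int), (∀ i ∈ l, 0 ≤ i) → diff.length = texts.length + 1 →
    ∃ c : Int,
      (l.foldl
        (fun diff i =>
          if i + (r.length : Int) ≤ (texts.length : Int) ∧
             PySem.List.slice texts (some i) (some (i + (r.length : Int))) = r
          then pvApplyMatch diff i r.length else diff)
        diff).length = diff.length ∧
      pvPsum (l.foldl
        (fun diff i =>
          if i + (r.length : Int) ≤ (texts.length : Int) ∧
             PySem.List.slice texts (some i) (some (i + (r.length : Int))) = r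
          then pvApplyMatch diff i r.length else diff)
        diff) k = pvPsum diff k + c ∧
      0 ≤ c ∧
      (0 < c ↔ ∃ i ∈ l,
        (i + (r.length : Int) ≤ (texts.length : Int) ∧
         PySem.List.slice texts (some i) (some (i + (r.length : Int))) = r) ∧
        i.toNat ≤ k ∧ k < i.toNat + r.length) := by
  intro l
  induction l with
  | nil =>
    intro diff _ _
    exact ⟨0, rfl, by simp, le_refl 0, by simp⟩
  | cons i l ih =>
    intro diff hpos hlen
    by_cases hc : i + (r.length : Int) ≤ (texts.length : Int) ∧
        PySem.List.slice texts (some i) (some (i + (r.length : Int))) = r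
    · have hi0 : 0 ≤ i := hpos i (List.mem_cons_self)
      have hm : i.toNat + r.length ≤ texts.length := by omega
      obtain ⟨c, hlen', hps, hc0, hiff⟩ := ih (pvApplyMatch diff i r.length)
        (fun x hx => hpos x (List.mem_cons_of_mem _ hx))
        (by rw [pvApplyMatch_length]; exact hlen)
      refine ⟨c + (if i.toNat ≤ k ∧ k < i.toNat + r.length then 1 else 0), ?_, ?_, ?_, ?_⟩
      · rw [List.foldl_cons, if_pos hc, hlen', pvApplyMatch_length]
      · rw [List.foldl_cons, if_pos hc, hps,
          pvPsum_apply diff i r.length k texts.length hi0 hm hlen]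
        ring
      · split_ifs <;> omega
      · constructor
        · intro hlt
          by_cases hcov : i.toNat ≤ k ∧ k < i.toNat + r.length
          · exact ⟨i, List.mem_cons_self, hc, hcov⟩
          · rw [if_neg hcov, add_zero] at hlt
            obtain ⟨i', hi', hrest⟩ := hiff.mp hlt
            exact ⟨i', List.mem_cons_of_mem _ hi', hrest⟩
        · rintro ⟨i', hi', hc', hcov'⟩
          rcases List.mem_cons.mp hi' with rfl | hmem
          · rw [if_pos hcov']; omega
          · have := hiff.mpr ⟨i', hmem, hc', hcov'⟩
            split_ifs <;> omega
    · obtain ⟨c, hlen', hps, hc0, hiff⟩ := ih diff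
        (fun x hx => hpos x (List.mem_cons_of_mem _ hx)) hlen
      refine ⟨c, by rw [List.foldl_cons, if_neg hc]; exact hlen', by rw [List.foldl_cons, if_neg hc]; exact hps, hc0, ?_⟩
      rw [hiff]
      constructor
      · rintro ⟨i', hi', hrest⟩; exact ⟨i', List.mem_cons_of_mem _ hi', hrest⟩
      · rintro ⟨i', hi', hc', hcov'⟩
        rcases List.mem_cons.mp hi' with rfl | hmem
        · exact absurd hc' hc
        · exact ⟨i', hmem, hc', hcov'⟩

abbrev pvBHitR (texts : List String) (r : List String) (k : Nat) : Prop :=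
  ∃ i ∈ (pvPosIndex texts).getD (r.headD "") [],
    (i + (r.length : Int) ≤ (texts.length : Int) ∧
     PySem.List.slice texts (some i) (some (i + (r.length : Int))) = r) ∧
    i.toNat ≤ k ∧ k < i.toNat + r.length

lemma pvPsum_diffArr (rationales : List (List String)) (texts : List String) (k : Nat) :
    ∃ c : Int,
      (pvDiffArr rationales texts).length = texts.length + 1 ∧
      pvPsum (pvDiffArr rationales texts) k = c ∧ 0 ≤ c ∧
      (0 < c ↔ ∃ r ∈ rationales, r.length ≠ 0 ∧ pvBHitR texts r k) := by
  unfold pvDiffArr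
  have hinit : pvPsum (List.replicate (texts.length + 1) (0 : Int)) k = 0 := by
    unfold pvPsum
    apply Finset.sum_eq_zero
    intro j _
    rw [List.getD_eq_getElem?_getD, List.getElem?_replicate]
    split <;> simp
  suffices h : ∀ (rs : List (List String)) (diff : List Int), diff.length = texts.length + 1 →
      ∃ c : Int,
        (rs.foldl
          (fun diff r =>
            if r.length = 0 then diff
            else ((pvPosIndex texts).getD (r.headD "") []).foldl
              (fun diff i =>
                if i + (r.length : Int) ≤ (texts.length : Int) ∧
                   PySem.List.slice texts (some i) (some (i + (r.length : Int))) = r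
                then pvApplyMatch diff i r.length else diff)
              diff)
          diff).length = diff.length ∧
        pvPsum (rs.foldl
          (fun diff r =>
            if r.length = 0 then diff
            else ((pvPosIndex texts).getD (r.headD "") []).foldl
              (fun diff i =>
                if i + (r.length : Int) ≤ (texts.length : Int) ∧
                   PySem.List.slice texts (some i) (some (i + (r.length : Int))) = r
                then pvApplyMatch diff i r.length else diff)
              diff)
          diff) k = pvPsum diff k + c ∧ 0 ≤ c ∧
        (0 < c ↔ ∃ r ∈ rs, r.length ≠ 0 ∧ pvBHitR texts r k) by
    obtain ⟨c, hl, hp, hc0, hiff⟩ := h rationales (List.replicate (texts.length + 1) 0) (by simp)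
    exact ⟨c, by rw [hl]; simp, by rw [hp, hinit, zero_add], hc0, hiff⟩
  intro rs
  induction rs with
  | nil =>
    intro diff _
    exact ⟨0, rfl, by simp, le_refl 0, by simp⟩
  | cons r rs ih =>
    intro diff hlen
    by_cases hz : r.length = 0
    · obtain ⟨c, hl, hp, hc0, hiff⟩ := ih diff hlen
      refine ⟨c, by rw [List.foldl_cons, if_pos hz]; exact hl,
        by rw [List.foldl_cons, if_pos hz]; exact hp, hc0, ?_⟩
      rw [hiff]
      constructor
      · rintro ⟨r', hr', hrest⟩; exact ⟨r', List.mem_cons_of_mem _ hr', hrest⟩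
      · rintro ⟨r', hr', hne', hbh⟩
        rcases List.mem_cons.mp hr' with rfl | hmem
        · exact absurd hz hne'
        · exact ⟨r', hmem, hne', hbh⟩
    · have hpos : ∀ i ∈ (pvPosIndex texts).getD (r.headD "") [], (0 : Int) ≤ i := by
        intro i hi
        obtain ⟨a, _, _, rfl⟩ := (pvPosIndex_mem texts _ i).mp hi
        exact Int.natCast_nonneg a
      obtain ⟨c1, hl1, hp1, hc10, hiff1⟩ :=
        pvPsum_inner texts r k ((pvPosIndex texts).getD (r.headD "") []) diff hpos hlen
      obtain ⟨c2, hl2, hp2, hc20, hiff2⟩ := ih _ (by rw [hl1]; exact hlen)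
      refine ⟨c1 + c2, ?_, ?_, by omega, ?_⟩
      · rw [List.foldl_cons, if_neg hz, hl2, hl1]
      · rw [List.foldl_cons, if_neg hz, hp2, hp1]; ring
      · constructor
        · intro hlt
          by_cases h1 : 0 < c1
          · exact ⟨r, List.mem_cons_self, hz, hiff1.mp h1⟩
          · obtain ⟨r', hr', hrest⟩ := hiff2.mp (by omega)
            exact ⟨r', List.mem_cons_of_mem _ hr', hrest⟩
        · rintro ⟨r', hr', hne', hbh⟩
          rcases List.mem_cons.mp hr' with rfl | hmem
          · have := hiff1.mpr hbh; omega
          · have := hiff2.mpr ⟨r', hmem, hne', hbh⟩; omega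

-- ---- the B characterisation agrees with A's ----

lemma pvBHit_iff (rationales : List (List String)) (texts : List String) (k : Nat) :
    (∃ r ∈ rationales, r.length ≠ 0 ∧ pvBHitR texts r k) ↔ pvHit texts rationales k := by
  constructor
  · rintro ⟨r, hr, hne, i, hidx, ⟨hle, hsl⟩, hik, hki⟩
    obtain ⟨a, ha, _, rfl⟩ := (pvPosIndex_mem texts _ i).mp hidx
    rw [Int.toNat_natCast] at hik hki
    rw [PySem.List.slice_natCast_add] at hsl
    have hmatch : pvMatchesRationale texts a r = true :=
      (pvMatches_iff texts a r).mpr ⟨by omega, hsl⟩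
    exact ⟨a, by omega, r, hr, hmatch, hik, hki⟩
  · rintro ⟨i, hin, r, hr, hm, hik, hki⟩
    obtain ⟨hle, hsl⟩ := (pvMatches_iff texts i r).mp hm
    have hne : r.length ≠ 0 := by omega
    refine ⟨r, hr, hne, (i : Int), ?_, ⟨by omega, ?_⟩, ?_, ?_⟩
    · -- texts[i] is r's head, so i is listed in the index under r.headD ""
      apply (pvPosIndex_mem texts _ _).mpr
      refine ⟨i, by omega, ?_, rfl⟩
      obtain ⟨h, tl, rfl⟩ : ∃ h tl, r = h :: tl := by
        cases r with
        | nil => simp at hne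
        | cons h tl => exact ⟨h, tl, rfl⟩
      have hi : i < texts.length := by simp at hle; omega
      rw [List.drop_eq_getElem_cons hi, List.length_cons, List.take_succ_cons] at hsl
      rw [List.getElem?_eq_getElem hi]
      have : texts[i] = h := (List.cons.injEq _ _ _ _ ▸ hsl).1
      simp [this]
    · rw [PySem.List.slice_natCast_add]; exact hsl
    · rw [Int.toNat_natCast]; omega
    · rw [Int.toNat_natCast]; omega

-- ---- the final sweep of B ----

lemma pvSweep (diff : List Int) :
    ∀ t : Nat,
    (List.range t).foldl
      (fun (st : Int × List Int) k =>
        let cur := st.1 + diff.getD k 0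
        (cur, st.2 ++ [if 0 < cur then (-1 : Int) else 1]))
      (0, [])
    = (∑ j ∈ Finset.range t, diff.getD j 0,
       (List.range t).map (fun k => if 0 < pvPsum diff k then (-1 : Int) else 1)) := by
  intro t
  induction t with
  | zero => simp
  | succ t ih =>
    rw [List.range_succ, List.foldl_append, ih, List.foldl_cons, List.foldl_nil,
      List.map_append]
    have hcur : (∑ j ∈ Finset.range t, diff.getD j 0) + diff.getD t 0
        = ∑ j ∈ Finset.range (t + 1), diff.getD j 0 := (Finset.sum_range_succ _ t).symm
    have hpsum : pvPsum diff t = ∑ j ∈ Finset.range (t + 1), diff.getD j 0 := rfl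
    simp only []
    rw [hcur, List.map_singleton, hpsum]

lemma pvB_getElem? (rationales : List (List String)) (texts : List String) (k : Nat) :
    (create_rationale_mask_alt rationales texts)[k]?
      = if k < texts.length then
          some (if 0 < pvPsum (pvDiffArr rationales texts) k then (-1 : Int) else 1)
        else none := by
  unfold create_rationale_mask_alt
  simp only []
  rw [pvSweep]
  by_cases hk : k < texts.length
  · rw [if_pos hk, List.getElem?_map, List.getElem?_range hk]
    rfl
  · rw [if_neg hk, List.getElem?_eq_none]
    rw [List.length_map, List.length_range]
    omega

-- ===== VERDICT (by name: the statement is the Claim_ definition above) =====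
theorem create_rationale_mask_spec : Claim_equal_create_rationale_mask := by
  intro rationales texts _
  unfold Spec_create_rationale_mask
  apply List.ext_getElem?
  intro k
  rw [pvA_getElem?, pvB_getElem?]
  by_cases hk : k < texts.length
  · rw [if_pos hk, if_pos hk]
    obtain ⟨c, _, hp, hc0, hiff⟩ := pvPsum_diffArr rationales texts k
    rw [hp]
    by_cases hh : pvHit texts rationales k
    · rw [if_pos hh, if_pos (hiff.mpr ((pvBHit_iff rationales texts k).mpr hh))]
    · rw [if_neg hh, if_neg (fun h => hh ((pvBHit_iff rationales texts k).mp (hiff.mp h)))]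
  · rw [if_neg hk, if_neg hk]
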